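-- pv_equiv track=rewrite | github.com/BradSchoenrock/fibonacci | checkFib.py | fibPos
-- ===== SOURCE A (Python) =====
-- def fibPos(inNum):
--     # check for first few numbers
--     if inNum <0:
--         return -1
--     if inNum ==0:
--         return 1
--     if inNum ==1:
--         return 2
--     # set variable initial values
--     first=0
--     second=1
--     nex=1
--     count = 3
--     # keep calculating higher fib numbers until we are at or over inNum
--     while nex <= inNum:
--         ans=second+nex
--         first = second
--         second = nex
--         nex = ans
--         count = count +1
--         # found it
--         if nex == inNum:
--             return count
--     # didn't find it
--     else:
--         return -1
-- ===== SOURCE B (Python) =====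
-- def fibPos(inNum):
--     # Build the Fibonacci list [0, 1, 1, 2, 3, ...] until the last entry exceeds inNum,
--     # then answer by first-occurrence lookup (1-based position).
--     fibs = [0, 1]
--     while fibs[-1] <= inNum:
--         fibs.append(fibs[-1] + fibs[-2])
--     if inNum in fibs:
--         return fibs.index(inNum) + 1
--     return -1
-- ===== Notes on version B (the rewrite author's own statement) =====
-- stated objective: alternative
-- what changed: A walks the Fibonacci sequence in a single early-return loop over three rolling scalars; B instead materialises the Fibonacci list up to inNum and answers by a first-occurrence membership lookup (index+1).
import Mathlib
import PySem

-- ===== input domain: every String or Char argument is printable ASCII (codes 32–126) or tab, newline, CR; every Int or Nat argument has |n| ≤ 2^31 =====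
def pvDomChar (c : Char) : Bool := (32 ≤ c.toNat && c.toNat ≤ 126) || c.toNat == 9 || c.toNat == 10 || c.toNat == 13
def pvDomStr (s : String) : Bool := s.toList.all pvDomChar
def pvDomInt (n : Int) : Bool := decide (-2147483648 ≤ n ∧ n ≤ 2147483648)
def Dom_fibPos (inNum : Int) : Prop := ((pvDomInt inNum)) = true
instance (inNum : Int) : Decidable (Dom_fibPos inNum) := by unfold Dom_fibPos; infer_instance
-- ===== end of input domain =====

-- B replaces A's rolling-scalar early-return loop by build-the-Fibonacci-list-then-lookup (alternative decomposition, same cost).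

-- ===== PORT A =====
-- A's while loop; fuel (inNum.toNat + 1) only makes the recursion total and is never
-- exhausted: nex strictly increases each iteration, so the loop runs ≤ inNum times.
def fibLoopA (inNum second nex count : Int) : Nat → Int
  | 0 => -1
  | fuel + 1 =>
    if nex ≤ inNum then
      let ans := second + nex
      let second' := nex
      let nex' := ans
      let count' := count + 1
      if nex' = inNum then count' else fibLoopA inNum second' nex' count' fuel
    else -1

def fibPos (inNum : Int) : Int :=
  if inNum < 0 then -1
  else if inNum = 0 then 1
  else if inNum = 1 then 2
  else fibLoopA inNum 1 1 3 (inNum.toNat + 1)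

-- ===== PORT B =====
-- B's while loop: append fibs[-1]+fibs[-2] while fibs[-1] ≤ inNum; the last two
-- elements are carried as (a, b).  Fuel (inNum.toNat + 2) is never exhausted.
def fibBuild (inNum a b : Int) (fibs : List Int) : Nat → List Int
  | 0 => fibs
  | fuel + 1 =>
    if b ≤ inNum then fibBuild inNum b (a + b) (fibs ++ [a + b]) fuel
    else fibs

def fibPos_alt (inNum : Int) : Int :=
  match PySem.List.index? (fibBuild inNum 0 1 [0, 1] (inNum.toNat + 2)) inNum with
  | some i => (i : Int) + 1
  | none => -1

-- ===== PRECONDITION & SPEC =====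
def Spec_fibPos (inNum : Int) (out : Int) : Prop := out = fibPos_alt inNum
instance (inNum : Int) (out : Int) : Decidable (Spec_fibPos inNum out) := by unfold Spec_fibPos; infer_instance

-- ===== CLAIM (what is proved, stated in full; the proofs are below) =====
def Claim_equal_fibPos : Prop := ∀ (inNum : Int), Dom_fibPos inNum → Spec_fibPos inNum (fibPos inNum)

-- ===== LEMMAS AND PROOFS =====

-- fibBuild only appends: its result extends the accumulator.
theorem fibBuild_prefix (inNum : Int) : ∀ (fuel : Nat) (a b : Int) (fibs : List Int),
    ∃ t, fibBuild inNum a b fibs fuel = fibs ++ t := by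
  intro fuel
  induction fuel with
  | zero => intro a b fibs; exact ⟨[], by simp [fibBuild]⟩
  | succ fuel ih =>
    intro a b fibs
    simp only [fibBuild]
    by_cases hle : b ≤ inNum
    · simp only [if_pos hle]
      obtain ⟨t, ht⟩ := ih b (a + b) (fibs ++ [a + b])
      exact ⟨[a + b] ++ t, by simp [ht]⟩
    · exact ⟨[], by simp [if_neg hle]⟩

-- Once v has been appended after a v-free prefix l, its first-occurrence index
-- in any further-built list stays l.length.
theorem fibBuild_index_found (inNum v : Int) (fuel : Nat) (a b : Int) (l : List Int)
    (hmem : v ∉ l) :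
    PySem.List.index? (fibBuild inNum a b (l ++ [v]) fuel) v = some l.length := by
  obtain ⟨t, ht⟩ := fibBuild_prefix inNum fuel a b (l ++ [v])
  rw [ht, PySem.List.index?_append_of_mem t (by simp : v ∈ l ++ [v]),
      PySem.List.index?_append_singleton_self l v hmem]

-- Core invariant: with the same fuel, A's loop from state (a, b, count) equals B's
-- lookup on the list built from (a, b) onto any inNum-free prefix l of length count.
theorem loop_eq_build (inNum : Int) : ∀ (fuel : Nat) (a b count : Int) (l : List Int),
    count = (l.length : Int) → inNum ∉ l →
    fibLoopA inNum a b count fuel =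
      (match PySem.List.index? (fibBuild inNum a b l fuel) inNum with
       | some i => (i : Int) + 1
       | none => -1) := by
  intro fuel
  induction fuel with
  | zero =>
    intro a b count l hc hmem
    rw [show fibBuild inNum a b l 0 = l from rfl,
        (PySem.List.index?_eq_none_iff l inNum).mpr hmem]
    rfl
  | succ fuel ih =>
    intro a b count l hc hmem
    simp only [fibLoopA, fibBuild]
    by_cases hle : b ≤ inNum
    · simp only [if_pos hle]
      by_cases heq : a + b = inNum
      · simp only [if_pos heq]
        subst heq
        rw [fibBuild_index_found (a + b) (a + b) fuel b (a + b) l hmem]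
        simp only [hc]
      · simp only [if_neg heq]
        have hmem' : inNum ∉ l ++ [a + b] := by
          simp only [List.mem_append, List.mem_singleton]
          rintro (h | h)
          · exact hmem h
          · exact heq h.symm
        exact ih b (a + b) (count + 1) (l ++ [a + b]) (by simp [hc]) hmem'
    · simp only [if_neg hle]
      rw [(PySem.List.index?_eq_none_iff l inNum).mpr hmem]

-- ===== VERDICT (by name: the statement is the Claim_ definition above) =====
theorem fibPos_spec : Claim_equal_fibPos := by
  intro inNum _
  unfold Spec_fibPos fibPos fibPos_alt
  by_cases hneg : inNum < 0
  · have ht : inNum.toNat = 0 := Int.toNat_of_nonpos (le_of_lt hneg)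
    have hnm : inNum ∉ ([0, 1] : List Int) := by
      simp only [List.mem_cons, List.not_mem_nil]
      rintro (h | h | h) <;> omega
    rw [if_pos hneg, ht]
    rw [show fibBuild inNum 0 1 [0, 1] (0 + 2)
          = [0, 1] from by simp [fibBuild, show ¬ (1 : Int) ≤ inNum by omega]]
    rw [(PySem.List.index?_eq_none_iff _ inNum).mpr hnm]
  · rw [if_neg hneg]
    by_cases h0 : inNum = 0
    · subst h0; decide
    · rw [if_neg h0]
      by_cases h1 : inNum = 1
      · subst h1; decide
      · rw [if_neg h1]
        have h2 : 2 ≤ inNum := by omega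
        have hfuel : inNum.toNat + 2 = (inNum.toNat + 1) + 1 := by omega
        rw [hfuel,
            show fibBuild inNum 0 1 [0, 1] ((inNum.toNat + 1) + 1)
              = fibBuild inNum 1 1 [0, 1, 1] (inNum.toNat + 1) from by
                simp [fibBuild, show (1 : Int) ≤ inNum by omega]]
        exact loop_eq_build inNum (inNum.toNat + 1) 1 1 3 [0, 1, 1] (by simp)
          (by simp only [List.mem_cons, List.not_mem_nil]; rintro (h | h | h | h) <;> omega)
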